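-- pv_equiv track=rewrite | github.com/DFieldFL/publix-bogo-notification | publix_bogos/bogos.py | is_bogo
-- ===== SOURCE A (Python) =====
-- def is_bogo(item_sale_text: str) -> bool:
--     """Determine if the sales text is for a BOGO sale.
--
--     Args:
--         item_sale_text (str): text to parse for BOGO
--
--     Returns:
--         bool: True if text is considered BOGO otherwise False
--     """
--     bogo_text = [
--         "buy 1 get 1 free",
--         "buy one get one free",
--         "buy one get 1 free",
--         "buy 1 get one free",
--     ]
--     return any(s in item_sale_text.lower() for s in bogo_text)
-- ===== SOURCE B (Python) =====
-- def _num_end(s, i):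
--     """Return index after a number token ('one' or '1') at position i, else None."""
--     if s.startswith("one", i):
--         return i + 3
--     if s.startswith("1", i):
--         return i + 1
--     return None
--
--
-- def _bogo_at(s, i):
--     """True iff a BOGO phrase starts at position i of lowercase s."""
--     if not s.startswith("buy ", i):
--         return False
--     j = _num_end(s, i + 4)
--     if j is None:
--         return False
--     if not s.startswith(" get ", j):
--         return False
--     k = _num_end(s, j + 5)
--     if k is None:
--         return False
--     return s.startswith(" free", k)
--
--
-- def is_bogo(item_sale_text: str) -> bool:
--     """Determine if the sales text is for a BOGO sale."""
--     s = item_sale_text.lower()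
--     for i in range(len(s)):
--         if _bogo_at(s, i):
--             return True
--     return False
-- ===== Notes on version B (the rewrite author's own statement) =====
-- stated objective: alternative
-- what changed: Replaced the four independent substring scans (any over a list of phrase variants) with a single left-to-right scan that runs one tokenized phrase matcher (fixed words with a number token that is either the digit or the word) at each position.
import Mathlib
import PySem

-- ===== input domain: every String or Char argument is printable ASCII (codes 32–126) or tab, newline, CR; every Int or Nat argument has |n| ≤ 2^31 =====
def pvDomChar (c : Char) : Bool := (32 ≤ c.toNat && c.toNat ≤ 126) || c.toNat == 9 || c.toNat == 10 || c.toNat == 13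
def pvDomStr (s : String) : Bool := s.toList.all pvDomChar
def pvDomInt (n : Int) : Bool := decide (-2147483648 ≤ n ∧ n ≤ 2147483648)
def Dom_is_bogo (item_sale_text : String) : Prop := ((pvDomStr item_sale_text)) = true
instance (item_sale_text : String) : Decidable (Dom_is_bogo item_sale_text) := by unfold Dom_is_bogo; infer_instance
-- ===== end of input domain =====

-- B replaces A's four independent substring scans with a single left-to-right scan
-- running one tokenized phrase matcher at each position (objective: alternative algorithm).


-- ===== PORT A =====
-- literal port: any(s in item_sale_text.lower() for s in bogo_text)
def is_bogo (item_sale_text : String) : Bool :=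
  ["buy 1 get 1 free", "buy one get one free", "buy one get 1 free", "buy 1 get one free"].any
    (fun s => PySem.Str.isIn s (PySem.Str.lower item_sale_text))

-- ===== PORT B =====
-- s.startswith(tok, i) phrased on the suffix at i: consume tok, return the rest (none = no match)
def pvTok : List Char → List Char → Option (List Char)
  | [], s => some s
  | _, [] => none
  | p :: ps, c :: cs => if c = p then pvTok ps cs else none

-- _num_end: match "one" first, else "1"
def pvNum (s : List Char) : Option (List Char) :=
  match pvTok "one".toList s with
  | some r => some r
  | none => pvTok "1".toList s

-- _bogo_at
def pvBogoAt (s : List Char) : Bool :=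
  match pvTok "buy ".toList s with
  | none => false
  | some r1 =>
    match pvNum r1 with
    | none => false
    | some r2 =>
      match pvTok " get ".toList r2 with
      | none => false
      | some r3 =>
        match pvNum r3 with
        | none => false
        | some r4 => (pvTok " free".toList r4).isSome

-- the for-loop over positions, as recursion over suffixes
def pvScan : List Char → Bool
  | [] => false
  | c :: cs => pvBogoAt (c :: cs) || pvScan cs

def is_bogo_alt (item_sale_text : String) : Bool :=
  pvScan (PySem.Chars.lower item_sale_text.toList)

-- ===== PRECONDITION & SPEC =====
def Spec_is_bogo (item_sale_text : String) (out : Bool) : Prop := out = is_bogo_alt item_sale_text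
instance (item_sale_text : String) (out : Bool) : Decidable (Spec_is_bogo item_sale_text out) := by unfold Spec_is_bogo; infer_instance

-- ===== CLAIM (what is proved, stated in full; the proofs are below) =====
def Claim_equal_is_bogo : Prop := ∀ (item_sale_text : String), Dom_is_bogo item_sale_text → Spec_is_bogo item_sale_text (is_bogo item_sale_text)

-- ===== LEMMAS AND PROOFS =====

lemma pvTok_eq_some {p s r : List Char} : pvTok p s = some r ↔ s = p ++ r := by
  induction p generalizing s with
  | nil => simp [pvTok]
  | cons a ps ih =>
    cases s with
    | nil => simp [pvTok]
    | cons c cs =>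
      by_cases h : c = a <;> simp [pvTok, h, ih]

lemma pvNum_eq_some {s r : List Char} :
    pvNum s = some r ↔ s = "one".toList ++ r ∨ s = "1".toList ++ r := by
  unfold pvNum
  rcases h : pvTok "one".toList s with _ | r'
  · constructor
    · intro hr; exact Or.inr (pvTok_eq_some.mp hr)
    · rintro (he | he)
      · have h2 := pvTok_eq_some.mpr he; rw [h2] at h; exact (Option.some_ne_none _ h).elim
      · exact pvTok_eq_some.mpr he
  · have hs := pvTok_eq_some.mp h
    subst hs
    constructor
    · intro hr; injection hr with hr; subst hr; exact Or.inl rfl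
    · rintro (he | he)
      · simp only [List.append_cancel_left_eq] at he; rw [he]
      · exact absurd he (by simp)

lemma pvBogoAt_iff (s : List Char) : pvBogoAt s = true ↔
    ("buy 1 get 1 free".toList <+: s ∨ "buy one get one free".toList <+: s ∨
     "buy one get 1 free".toList <+: s ∨ "buy 1 get one free".toList <+: s) := by
  constructor
  · intro h
    unfold pvBogoAt at h
    rcases h1 : pvTok "buy ".toList s with _ | r1 <;> simp only [h1, Bool.false_eq_true] at h
    rcases h2 : pvNum r1 with _ | r2 <;> simp only [h2, Bool.false_eq_true] at h
    rcases h3 : pvTok " get ".toList r2 with _ | r3 <;> simp only [h3, Bool.false_eq_true] at h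
    rcases h4 : pvNum r3 with _ | r4 <;> simp only [h4, Bool.false_eq_true] at h
    have e1 := pvTok_eq_some.mp h1
    have e2 := pvNum_eq_some.mp h2
    have e3 := pvTok_eq_some.mp h3
    have e4 := pvNum_eq_some.mp h4
    rcases h5 : pvTok " free".toList r4 with _ | r5
    · rw [h5] at h; exact absurd h (by simp)
    have e5 := pvTok_eq_some.mp h5
    subst e1; subst e3; subst e5
    rcases e2 with e2 | e2 <;> rcases e4 with e4 | e4 <;> subst e2 <;> subst e4
    · exact Or.inr (Or.inl ⟨r5, by simp⟩)
    · exact Or.inr (Or.inr (Or.inl ⟨r5, by simp⟩))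
    · exact Or.inr (Or.inr (Or.inr ⟨r5, by simp⟩))
    · exact Or.inl ⟨r5, by simp⟩
  · rintro (⟨t, ht⟩ | ⟨t, ht⟩ | ⟨t, ht⟩ | ⟨t, ht⟩) <;> subst ht <;> rfl

lemma pvScan_iff (s : List Char) : pvScan s = true ↔
    ∃ t, t <:+ s ∧ pvBogoAt t = true := by
  induction s with
  | nil =>
    simp only [pvScan, Bool.false_eq_true, false_iff]
    rintro ⟨t, ht, hb⟩
    rw [List.suffix_nil.mp ht] at hb
    exact absurd hb (by decide)
  | cons c cs ih =>
    simp only [pvScan, Bool.or_eq_true, ih]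
    constructor
    · rintro (h | ⟨t, ht, hb⟩)
      · exact ⟨c :: cs, List.suffix_refl _, h⟩
      · exact ⟨t, ht.trans (List.suffix_cons c cs), hb⟩
    · rintro ⟨t, ht, hb⟩
      rcases List.suffix_cons_iff.mp ht with h | h
      · subst h; exact Or.inl hb
      · exact Or.inr ⟨t, h, hb⟩

-- ===== VERDICT (by name: the statement is the Claim_ definition above) =====
theorem is_bogo_spec : Claim_equal_is_bogo := by
  intro s _
  unfold Spec_is_bogo is_bogo is_bogo_alt
  rw [Bool.eq_iff_iff]
  simp only [List.any_cons, List.any_nil, Bool.or_eq_true, Bool.or_false,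
    PySem.Str.isIn_iff_infix, PySem.Str.toList_lower, pvScan_iff]
  constructor
  · rintro (h | h | h | h)
    · rcases List.infix_iff_prefix_suffix.mp h with ⟨t, hp, hs⟩
      exact ⟨t, hs, (pvBogoAt_iff t).mpr (Or.inl hp)⟩
    · rcases List.infix_iff_prefix_suffix.mp h with ⟨t, hp, hs⟩
      exact ⟨t, hs, (pvBogoAt_iff t).mpr (Or.inr (Or.inl hp))⟩
    · rcases List.infix_iff_prefix_suffix.mp h with ⟨t, hp, hs⟩
      exact ⟨t, hs, (pvBogoAt_iff t).mpr (Or.inr (Or.inr (Or.inl hp)))⟩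
    · rcases List.infix_iff_prefix_suffix.mp h with ⟨t, hp, hs⟩
      exact ⟨t, hs, (pvBogoAt_iff t).mpr (Or.inr (Or.inr (Or.inr hp)))⟩
  · rintro ⟨t, hs, hb⟩
    rcases (pvBogoAt_iff t).mp hb with h | h | h | h
    · exact Or.inl (List.infix_iff_prefix_suffix.mpr ⟨t, h, hs⟩)
    · exact Or.inr (Or.inl (List.infix_iff_prefix_suffix.mpr ⟨t, h, hs⟩))
    · exact Or.inr (Or.inr (Or.inl (List.infix_iff_prefix_suffix.mpr ⟨t, h, hs⟩)))
    · exact Or.inr (Or.inr (Or.inr (List.infix_iff_prefix_suffix.mpr ⟨t, h, hs⟩)))
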